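-- pv_equiv track=rewrite | github.com/Oichkatzelesfrettschen/open_gororoba | src/verification/verify_third_party_sources.py | validate_no_duplicate_verification_ids
-- ===== SOURCE A (Python) =====
-- from typing import Dict, List, Set, Tuple
--
-- def validate_no_duplicate_verification_ids(verify_reg: dict) -> Tuple[bool, List[str]]:
--     """Verify no duplicate verification IDs."""
--     errors = []
--     if 'verification' not in verify_reg:
--         return True, errors
--
--     seen_ids = {}
--     for idx, verif in enumerate(verify_reg['verification']):
--         ver_id = verif.get('id', '')
--         if ver_id in seen_ids:
--             errors.append(
--                 f"Verification {idx} ID '{ver_id}' duplicates earlier at index {seen_ids[ver_id]}"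
--             )
--         else:
--             seen_ids[ver_id] = idx
--
--     return len(errors) == 0, errors
-- ===== SOURCE B (Python) =====
-- def validate_no_duplicate_verification_ids(verify_reg: dict):
--     """Verify no duplicate verification IDs."""
--     if 'verification' not in verify_reg:
--         return True, []
--     groups = {}
--     for idx, verif in enumerate(verify_reg['verification']):
--         groups.setdefault(verif.get('id', ''), []).append(idx)
--     dups = []
--     for ver_id, idxs in groups.items():
--         first, *rest = idxs
--         for i in rest:
--             dups.append((i, ver_id, first))
--     dups.sort(key=lambda t: t[0])
--     errors = [
--         f"Verification {i} ID '{v}' duplicates earlier at index {f}"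
--         for i, v, f in dups
--     ]
--     return not errors, errors
-- ===== Notes on version B (the rewrite author's own statement) =====
-- stated objective: alternative
-- what changed: B replaces A's single stateful pass (dict of first indices, emitting errors as it goes) with a group-then-sort pipeline: it buckets all occurrence indices per id into a dict of lists, emits one (dup_index, id, first_index) triple per non-first occurrence of each group, sorts the triples by duplicate index, and only then formats the error strings.
import Mathlib
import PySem

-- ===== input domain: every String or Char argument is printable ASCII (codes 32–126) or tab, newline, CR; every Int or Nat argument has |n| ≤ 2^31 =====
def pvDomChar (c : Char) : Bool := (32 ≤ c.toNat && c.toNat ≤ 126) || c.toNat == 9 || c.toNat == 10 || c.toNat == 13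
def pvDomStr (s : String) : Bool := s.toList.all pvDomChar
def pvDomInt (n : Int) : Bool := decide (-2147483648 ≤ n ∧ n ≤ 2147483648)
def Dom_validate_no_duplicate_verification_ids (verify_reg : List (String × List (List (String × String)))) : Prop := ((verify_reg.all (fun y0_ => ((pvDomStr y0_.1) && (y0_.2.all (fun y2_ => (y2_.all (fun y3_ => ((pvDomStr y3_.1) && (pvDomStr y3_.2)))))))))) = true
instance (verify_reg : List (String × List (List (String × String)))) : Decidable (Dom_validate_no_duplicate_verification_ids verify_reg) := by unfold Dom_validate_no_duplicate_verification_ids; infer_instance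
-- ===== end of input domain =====

-- B replaces A's single stateful pass with a group-then-sort pipeline (dict of occurrence-index
-- lists per id, one triple per non-first occurrence, sorted by duplicate index, formatted last);
-- alternative decomposition, not claimed faster.

-- ===== PORT A =====
-- Python dict values arrive as association lists; lookup is first match.
def pvLookup {α : Type} (d : List (String × α)) (k : String) : Option α :=
  (d.find? (fun p => p.1 == k)).map (·.2)

def pvGetId (verif : List (String × String)) : String :=
  ((verif.find? (fun p => p.1 == "id")).map (·.2)).getD ""

def pvErr (idx : Int) (ver_id : String) (j : Int) : String :=
  "Verification " ++ PySem.Int.toStr idx ++ " ID '" ++ ver_id ++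
    "' duplicates earlier at index " ++ PySem.Int.toStr j

def validate_no_duplicate_verification_ids (verify_reg : List (String × List (List (String × String)))) : Bool × List String :=
  match pvLookup verify_reg "verification" with
  | none => (true, [])
  | some lst =>
    let st := (PySem.List.enumerate lst 0).foldl
      (fun (st : PySem.Dict String Int × List String) p =>
        let ver_id := pvGetId p.2
        match st.1.get? ver_id with
        | some j => (st.1, st.2 ++ [pvErr p.1 ver_id j])
        | none => (st.1.insert ver_id p.1, st.2))
      (PySem.Dict.empty, [])
    (st.2.length == 0, st.2)

-- ===== PORT B =====
-- 'first, *rest = idxs' on a group's (always nonempty) index list; the [] arm is unreachable.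
def pvGroupPairs (p : String × List Int) : List (Int × String × Int) :=
  match p.2 with
  | [] => []
  | f :: rest => rest.map (fun i => (i, p.1, f))

def validate_no_duplicate_verification_ids_alt (verify_reg : List (String × List (List (String × String)))) : Bool × List String :=
  match pvLookup verify_reg "verification" with
  | none => (true, [])
  | some lst =>
    let groups := (PySem.List.enumerate lst 0).foldl
      (fun (d : PySem.Dict String (List Int)) p => d.modify (pvGetId p.2) [] (· ++ [p.1]))
      PySem.Dict.empty
    let dups := PySem.List.sorted (groups.items.flatMap pvGroupPairs) (fun t => t.1)
    let errors := dups.map (fun t => pvErr t.1 t.2.1 t.2.2)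
    (errors.isEmpty, errors)

-- ===== PRECONDITION & SPEC =====
def Spec_validate_no_duplicate_verification_ids (verify_reg : List (String × List (List (String × String)))) (out : Bool × List String) : Prop := out = validate_no_duplicate_verification_ids_alt verify_reg
instance (verify_reg : List (String × List (List (String × String)))) (out : Bool × List String) : Decidable (Spec_validate_no_duplicate_verification_ids verify_reg out) := by unfold Spec_validate_no_duplicate_verification_ids; infer_instance

-- ===== CLAIM (what is proved, stated in full; the proofs are below) =====
def Claim_equal_validate_no_duplicate_verification_ids : Prop := ∀ (verify_reg : List (String × List (List (String × String)))), Dom_validate_no_duplicate_verification_ids verify_reg → Spec_validate_no_duplicate_verification_ids verify_reg (validate_no_duplicate_verification_ids verify_reg)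

-- ===== LEMMAS AND PROOFS =====

-- Per-element contribution of each duplicate position: A's formatted line, B's raw triple.
def pvContrib (ids : List String) (p : Int × String) : List String :=
  if (((PySem.List.index? ids p.2).getD 0 : Nat) : Int) < p.1 then
    [pvErr p.1 p.2 (((PySem.List.index? ids p.2).getD 0 : Nat) : Int)]
  else []

def pvPairContrib (ids : List String) (p : Int × String) : List (Int × String × Int) :=
  if (((PySem.List.index? ids p.2).getD 0 : Nat) : Int) < p.1 then
    [(p.1, p.2, (((PySem.List.index? ids p.2).getD 0 : Nat) : Int))]
  else []

-- all duplicate triples, in increasing index order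
def pvP (ids : List String) : List (Int × String × Int) :=
  (PySem.List.enumerate ids 0).flatMap (pvPairContrib ids)

-- occurrence indices of an id
def pvOcc (ids : List String) (v : String) : List Int :=
  ((PySem.List.enumerate ids 0).filter (fun p => p.2 == v)).map (fun p => p.1)

theorem pv_enumerate_map {α β : Type} (f : α → β) (l : List α) (s : Int) :
    PySem.List.enumerate (l.map f) s = (PySem.List.enumerate l s).map (fun p => (p.1, f p.2)) := by
  induction l generalizing s with
  | nil => simp [PySem.List.enumerate_nil]
  | cons a t ih => simp [PySem.List.enumerate_cons, ih]

theorem pv_index_append_cons (pre suf : List String) (v : String) :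
    PySem.List.index? (pre ++ v :: suf) v =
      if v ∈ pre then PySem.List.index? pre v else some pre.length := by
  by_cases h : v ∈ pre
  · rw [if_pos h]; exact PySem.List.index?_append_of_mem _ h
  · rw [if_neg h]
    exact (PySem.List.index?_eq_some_iff _ _ _).2 ⟨pre, suf, rfl, rfl, h⟩

theorem pv_index_not_mem (l : List String) (x : String) (h : x ∉ l) :
    PySem.List.index? l x = none :=
  (PySem.List.index?_eq_none_iff _ _).2 h

theorem pv_index_lt (pre : List String) (v : String) (j : Nat)
    (h : PySem.List.index? pre v = some j) : j < pre.length := by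
  obtain ⟨p', s', hp, hl, -⟩ := (PySem.List.index?_eq_some_iff _ _ _).1 h
  subst hp hl; simp

-- A's running loop emits exactly the duplicate lines, in index order.
theorem pv_loop_eq (ids : List String) :
    ∀ (suf pre : List String) (seen : PySem.Dict String Int) (errs : List String),
    ids = pre ++ suf →
    (∀ x, seen.get? x = (PySem.List.index? pre x).map (fun n => (n : Int))) →
    ((PySem.List.enumerate suf (pre.length : Int)).foldl
      (fun (st : PySem.Dict String Int × List String) p =>
        match st.1.get? p.2 with
        | some j => (st.1, st.2 ++ [pvErr p.1 p.2 j])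
        | none => (st.1.insert p.2 p.1, st.2)) (seen, errs)).2
    = errs ++ (PySem.List.enumerate suf (pre.length : Int)).flatMap (pvContrib ids) := by
  intro suf
  induction suf with
  | nil => intro pre seen errs _ _; simp [PySem.List.enumerate_nil]
  | cons v rest ih =>
    intro pre seen errs hids H
    rw [PySem.List.enumerate_cons, List.foldl_cons, List.flatMap_cons]
    have hlen : (pre.length : Int) + 1 = ((pre ++ [v]).length : Int) := by simp
    have hidx : PySem.List.index? ids v =
        if v ∈ pre then PySem.List.index? pre v else some pre.length := by
      rw [hids]; exact pv_index_append_cons pre rest v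
    have hids' : ids = (pre ++ [v]) ++ rest := by simp [hids]
    cases hv : seen.get? v with
    | some j =>
      have hj : (PySem.List.index? pre v).map (fun n => (n : Int)) = some j := by
        rw [← H v, hv]
      cases hk : PySem.List.index? pre v with
      | none => rw [hk] at hj; simp at hj
      | some k =>
        rw [hk] at hj
        simp at hj
        have hmem : v ∈ pre := (PySem.List.index?_isSome_iff pre v).1 (by rw [hk]; rfl)
        have hklt : k < pre.length := pv_index_lt pre v k hk
        have hcontrib : pvContrib ids ((pre.length : Int), v) = [pvErr (pre.length : Int) v j] := by
          unfold pvContrib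
          simp only [hidx, if_pos hmem, hk, Option.getD_some]
          rw [if_pos (by exact_mod_cast hklt), hj]
        have H' : ∀ x, seen.get? x =
            (PySem.List.index? (pre ++ [v]) x).map (fun n => (n : Int)) := by
          intro x
          by_cases hx : x ∈ pre
          · rw [H x, PySem.List.index?_append_of_mem _ hx]
          · have hxv : x ≠ v := fun h => hx (h ▸ hmem)
            rw [H x, pv_index_not_mem _ _ hx, pv_index_not_mem _ _ (by simp [hx, hxv])]
        have step := ih (pre ++ [v]) seen (errs ++ [pvErr (pre.length : Int) v j]) hids' H'
        rw [hlen] at *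
        simp only [step, hcontrib]
        simp
    | none =>
      have hpre : PySem.List.index? pre v = none := by
        have := H v; rw [hv] at this
        cases hk : PySem.List.index? pre v with
        | none => rfl
        | some k => rw [hk] at this; simp at this
      have hnmem : v ∉ pre := (PySem.List.index?_eq_none_iff _ _).1 hpre
      have hcontrib : pvContrib ids ((pre.length : Int), v) = [] := by
        unfold pvContrib
        simp only [hidx, if_neg hnmem, Option.getD_some]
        rw [if_neg (by omega)]
      have H' : ∀ x, (seen.insert v (pre.length : Int)).get? x =
          (PySem.List.index? (pre ++ [v]) x).map (fun n => (n : Int)) := by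
        intro x
        rw [PySem.Dict.get?_insert]
        by_cases hxv : x = v
        · subst hxv
          rw [if_pos rfl, PySem.List.index?_append_singleton_self _ _ hnmem]
          simp
        · rw [if_neg hxv]
          by_cases hx : x ∈ pre
          · rw [H x, PySem.List.index?_append_of_mem _ hx]
          · rw [H x, pv_index_not_mem _ _ hx, pv_index_not_mem _ _ (by simp [hx, hxv])]
      have step := ih (pre ++ [v]) (seen.insert v (pre.length : Int)) errs hids' H'
      rw [hlen] at *
      simp only [step, hcontrib]
      simp

-- the head of an id's occurrence list is its first index
theorem pv_occ_head (ids : List String) (s : Int) (v : String) :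
    ((((PySem.List.enumerate ids s).filter (fun p => p.2 == v)).map (fun p => p.1))).head? =
      (PySem.List.index? ids v).map (fun j => (j : Int) + s) := by
  induction ids generalizing s with
  | nil => simp [PySem.List.enumerate_nil, PySem.List.index?]
  | cons a t ih =>
    rw [PySem.List.enumerate_cons]
    by_cases h : a = v
    · subst h
      simp [PySem.List.index?, List.idxOf?_cons]
    · have hb : (a == v) = false := by simp [h]
      simp only [List.filter_cons, hb, PySem.List.index?, List.idxOf?_cons]
      rw [show (PySem.List.index? t v) = List.idxOf? v t from rfl] at ih
      simp [ih]
      cases List.idxOf? v t with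
      | none => simp
      | some k => simp; omega


theorem pv_occ_append (ids : List String) (v w : String) :
    pvOcc (ids ++ [v]) w = pvOcc ids w ++ (if v == w then [(ids.length : Int)] else []) := by
  unfold pvOcc
  rw [PySem.List.enumerate_append, List.filter_append, List.map_append]
  congr 1
  simp [PySem.List.enumerate_cons, PySem.List.enumerate_nil, List.filter_cons]
  split <;> simp

theorem pv_occ_nil (ids : List String) (v : String) (h : v ∉ ids) : pvOcc ids v = [] := by
  unfold pvOcc
  rw [List.map_eq_nil_iff, List.filter_eq_nil_iff]
  intro p hp hbeq
  exact absurd (by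
    have : p.2 ∈ (PySem.List.enumerate ids 0).map (fun q => q.2) := List.mem_map_of_mem hp
    rwa [PySem.List.map_snd_enumerate, (by simpa using hbeq : p.2 = v)] at this) h

theorem pv_mem_contrib (ids : List String) (p : Int × String) (e : Int × String × Int)
    (h : e ∈ pvPairContrib ids p) : e.1 = p.1 := by
  unfold pvPairContrib at h
  split at h <;> simp at h
  rw [h]

theorem pv_pairwise (ids : List String) (l : List (Int × String))
    (h : l.Pairwise (fun a b => a.1 < b.1)) :
    (l.flatMap (pvPairContrib ids)).Pairwise (fun a b : Int × String × Int => a.1 < b.1) := by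
  induction l with
  | nil => simp
  | cons a t ih =>
    rw [List.flatMap_cons, List.pairwise_append]
    rcases List.pairwise_cons.1 h with ⟨ha, ht⟩
    refine ⟨?_, ih ht, ?_⟩
    · unfold pvPairContrib; split <;> simp
    · intro x hx y hy
      rcases List.mem_flatMap.1 hy with ⟨b, hb, hyb⟩
      rw [pv_mem_contrib ids a x hx, pv_mem_contrib ids b y hyb]
      exact ha b hb

theorem pv_perm_insert {α : Type} (x y z : List α) (e : α) :
    (x ++ ((y ++ [e]) ++ z)).Perm ((x ++ (y ++ z)) ++ [e]) := by
  simp only [List.append_assoc]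
  exact List.Perm.append_left x (List.Perm.append_left y (List.perm_append_comm))

-- appending one entry extends the duplicate-triple list by at most its own contribution
theorem pv_P_append (ids : List String) (v : String) :
    pvP (ids ++ [v]) = pvP ids ++ pvPairContrib (ids ++ [v]) ((0 + (ids.length : Int)), v) := by
  unfold pvP
  rw [PySem.List.enumerate_append, List.flatMap_append]
  congr 1
  · apply List.flatMap_congr
    intro p hp
    have hmem : p.2 ∈ ids := by
      have : p.2 ∈ (PySem.List.enumerate ids 0).map (fun q => q.2) := List.mem_map_of_mem hp
      rwa [PySem.List.map_snd_enumerate] at this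
    unfold pvPairContrib
    rw [PySem.List.index?_append_of_mem _ hmem]
  · simp [PySem.List.enumerate_cons, PySem.List.enumerate_nil]

-- B's grouped triples are a permutation of the in-order duplicate triples.
theorem pv_main (ids : List String) :
    ((PySem.Set.ofList ids).flatMap (fun v => pvGroupPairs (v, pvOcc ids v))).Perm (pvP ids) := by
  induction ids using List.reverseRecOn with
  | nil => simp [pvP, PySem.List.enumerate_nil]
  | append_singleton ids v ih =>
    rw [pv_P_append]
    have hof : PySem.Set.ofList (ids ++ [v]) = PySem.Set.add (PySem.Set.ofList ids) v := by
      simp [PySem.Set.ofList_eq_foldl, List.foldl_append]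
    by_cases hv : v ∈ ids
    · -- duplicate: the new position contributes one triple
      have hadd : PySem.Set.add (PySem.Set.ofList ids) v = PySem.Set.ofList ids := by
        simp [PySem.Set.add, PySem.Set.contains, (PySem.Set.mem_ofList ids v).2 hv]
      obtain ⟨j, hj⟩ : ∃ j, PySem.List.index? ids v = some j := by
        cases hk : PySem.List.index? ids v with
        | none => exact absurd ((PySem.List.index?_eq_none_iff _ _).1 hk) (by simp [hv])
        | some j => exact ⟨j, rfl⟩
      have hjlt : j < ids.length := pv_index_lt ids v j hj
      have hocc : (pvOcc ids v).head? = some ((j : Int)) := by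
        have := pv_occ_head ids 0 v
        rw [hj] at this
        simpa [pvOcc] using this
      obtain ⟨r, hr⟩ : ∃ r, pvOcc ids v = (j : Int) :: r := by
        cases hc : pvOcc ids v with
        | nil => rw [hc] at hocc; simp at hocc
        | cons f r => rw [hc] at hocc; simp at hocc; exact ⟨r, by rw [hocc]⟩
      -- contribution of the new position
      have hcontrib : pvPairContrib (ids ++ [v]) ((0 + (ids.length : Int)), v)
          = [((ids.length : Int), v, (j : Int))] := by
        unfold pvPairContrib
        rw [PySem.List.index?_append_of_mem _ hv]
        simp only [hj, Option.getD_some]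
        rw [if_pos (by omega)]
        simp
      -- split the key list at v
      obtain ⟨s, t, hst⟩ := List.append_of_mem ((PySem.Set.mem_ofList ids v).2 hv)
      have hnd : (PySem.Set.ofList ids).Nodup := PySem.Set.nodup_ofList ids
      rw [hst] at hnd
      have hvs : v ∉ s := by
        intro hmem
        exact (List.disjoint_of_nodup_append hnd) hmem (by simp)
      have hvt : v ∉ t := by
        rcases List.nodup_append.1 hnd with ⟨-, hvt', -⟩
        exact (List.nodup_cons.1 hvt').1
      have hgold : ∀ w ∈ s ++ v :: t, w ≠ v →
          pvGroupPairs (w, pvOcc (ids ++ [v]) w) = pvGroupPairs (w, pvOcc ids w) := by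
        intro w _ hwv
        rw [pv_occ_append]
        simp [show (v == w) = false from beq_eq_false_iff_ne.mpr (Ne.symm hwv)]
      have hgv : pvGroupPairs (v, pvOcc (ids ++ [v]) v)
          = pvGroupPairs (v, pvOcc ids v) ++ [((ids.length : Int), v, (j : Int))] := by
        rw [pv_occ_append, hr]
        simp [pvGroupPairs]
      have hs : s.flatMap (fun v_1 => pvGroupPairs (v_1, pvOcc (ids ++ [v]) v_1))
          = s.flatMap (fun v_1 => pvGroupPairs (v_1, pvOcc ids v_1)) :=
        List.flatMap_congr (fun w hw => hgold w (by simp [hw]) (fun h => hvs (h ▸ hw)))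
      have ht : t.flatMap (fun v_1 => pvGroupPairs (v_1, pvOcc (ids ++ [v]) v_1))
          = t.flatMap (fun v_1 => pvGroupPairs (v_1, pvOcc ids v_1)) :=
        List.flatMap_congr (fun w hw => hgold w (by simp [hw]) (fun h => hvt (h ▸ hw)))
      rw [hof, hadd, hst, List.flatMap_append, List.flatMap_cons, hs, ht, hgv, hcontrib]
      rw [hst, List.flatMap_append, List.flatMap_cons] at ih
      exact (pv_perm_insert _ _ _ _).trans (ih.append_right _)
    · -- first occurrence: nothing changes
      have hadd : PySem.Set.add (PySem.Set.ofList ids) v = PySem.Set.ofList ids ++ [v] := by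
        simp [PySem.Set.add, PySem.Set.contains, hv]
      have hcontrib : pvPairContrib (ids ++ [v]) ((0 + (ids.length : Int)), v) = [] := by
        unfold pvPairContrib
        rw [PySem.List.index?_append_singleton_self _ _ hv]
        simp only [Option.getD_some]
        rw [if_neg (by omega)]
      have hgv : pvGroupPairs (v, pvOcc (ids ++ [v]) v) = [] := by
        rw [pv_occ_append, pv_occ_nil ids v hv]
        simp [pvGroupPairs]
      rw [hof, hadd, hcontrib, List.flatMap_append, List.flatMap_cons, List.flatMap_nil]
      have hrest : (PySem.Set.ofList ids).flatMap (fun w => pvGroupPairs (w, pvOcc (ids ++ [v]) w))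
          = (PySem.Set.ofList ids).flatMap (fun w => pvGroupPairs (w, pvOcc ids w)) := by
        apply List.flatMap_congr
        intro w hw
        have hwv : w ≠ v := fun h => hv (h ▸ (PySem.Set.mem_ofList ids w).1 hw)
        rw [pv_occ_append]
        simp [show (v == w) = false from beq_eq_false_iff_ne.mpr (Ne.symm hwv)]
      rw [hgv, hrest]
      simpa using ih

theorem pv_contrib_eq_map (ids : List String) (p : Int × String) :
    pvContrib ids p = (pvPairContrib ids p).map (fun t => pvErr t.1 t.2.1 t.2.2) := by
  unfold pvContrib pvPairContrib
  split <;> simp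

-- ===== VERDICT (by name: the statement is the Claim_ definition above) =====
theorem validate_no_duplicate_verification_ids_spec : Claim_equal_validate_no_duplicate_verification_ids := by
  intro verify_reg _
  unfold Spec_validate_no_duplicate_verification_ids
  unfold validate_no_duplicate_verification_ids validate_no_duplicate_verification_ids_alt
  cases pvLookup verify_reg "verification" with
  | none => rfl
  | some lst =>
    simp only
    -- A's errors
    have hA :
        ((PySem.List.enumerate lst 0).foldl
          (fun (st : PySem.Dict String Int × List String) p =>
            let ver_id := pvGetId p.2
            match st.1.get? ver_id with
            | some j => (st.1, st.2 ++ [pvErr p.1 ver_id j])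
            | none => (st.1.insert ver_id p.1, st.2))
          (PySem.Dict.empty, [])).2
        = (pvP (lst.map pvGetId)).map (fun t => pvErr t.1 t.2.1 t.2.2) := by
      have h0 := pv_loop_eq (lst.map pvGetId) (lst.map pvGetId) [] PySem.Dict.empty []
        (by simp) (by intro x; simp [PySem.Dict.get?_empty, PySem.List.index?])
      simp only [List.length_nil, Int.natCast_zero, List.nil_append] at h0
      rw [show ((PySem.List.enumerate lst 0).foldl
          (fun (st : PySem.Dict String Int × List String) p =>
            let ver_id := pvGetId p.2
            match st.1.get? ver_id with
            | some j => (st.1, st.2 ++ [pvErr p.1 ver_id j])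
            | none => (st.1.insert ver_id p.1, st.2))
          (PySem.Dict.empty, []))
        = ((PySem.List.enumerate (lst.map pvGetId) 0).foldl
          (fun (st : PySem.Dict String Int × List String) p =>
            match st.1.get? p.2 with
            | some j => (st.1, st.2 ++ [pvErr p.1 p.2 j])
            | none => (st.1.insert p.2 p.1, st.2))
          (PySem.Dict.empty, [])) from by
          rw [pv_enumerate_map, List.foldl_map]]
      rw [h0]
      unfold pvP
      rw [List.map_flatMap]
      exact List.flatMap_congr (fun p _ => pv_contrib_eq_map _ p)
    -- B's groups dict
    have hgroups :
        ((PySem.List.enumerate lst 0).foldl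
          (fun (d : PySem.Dict String (List Int)) p => d.modify (pvGetId p.2) [] (· ++ [p.1]))
          PySem.Dict.empty).items.flatMap pvGroupPairs
        = (PySem.Set.ofList (lst.map pvGetId)).flatMap
            (fun v => pvGroupPairs (v, pvOcc (lst.map pvGetId) v)) := by
      set G := (PySem.List.enumerate lst 0).foldl
          (fun (d : PySem.Dict String (List Int)) p => d.modify (pvGetId p.2) [] (· ++ [p.1]))
          PySem.Dict.empty with hG
      have hfold : G = ((PySem.List.enumerate lst 0).map (fun p => (pvGetId p.2, p.1))).foldl
          (fun (d : PySem.Dict String (List Int)) p => d.modify p.1 [] (· ++ [p.2]))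
          PySem.Dict.empty := by
        rw [hG, List.foldl_map]
      have hkeys : G.keys = PySem.Set.ofList (lst.map pvGetId) := by
        have h1 := PySem.Dict.keys_foldl_modify_key (PySem.List.enumerate lst 0)
          (fun p : Int × List (String × String) => pvGetId p.2) ([] : List Int)
          (fun _ p l => l ++ [p.1]) PySem.Dict.empty
        have h2 : (PySem.List.enumerate lst 0).map
            (fun p : Int × List (String × String) => pvGetId p.2) = lst.map pvGetId := by
          rw [show (PySem.List.enumerate lst 0).map
              (fun p : Int × List (String × String) => pvGetId p.2)
              = ((PySem.List.enumerate lst 0).map (fun p => p.2)).map pvGetId from by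
            rw [List.map_map]; rfl]
          rw [PySem.List.map_snd_enumerate]
        rw [hG]
        refine h1.trans ?_
        rw [h2, PySem.Set.ofList_eq_foldl]
        rfl
      have hnd : G.keys.Nodup := by
        rw [hkeys]; exact PySem.Set.nodup_ofList _
      have hgetD : ∀ v, G.getD v [] = pvOcc (lst.map pvGetId) v := by
        intro v
        rw [hfold, PySem.Dict.getD_foldl_modify_append, PySem.Dict.getD_empty, List.nil_append]
        unfold pvOcc
        rw [pv_enumerate_map, List.filter_map, List.map_map, List.filter_map, List.map_map]
        rfl
      rw [PySem.Dict.items_eq_map_keys G hnd [], List.flatMap_map, hkeys]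
      exact List.flatMap_congr (fun v _ => by rw [hgetD v])
    have hsorted : PySem.List.sorted
        (((PySem.List.enumerate lst 0).foldl
          (fun (d : PySem.Dict String (List Int)) p => d.modify (pvGetId p.2) [] (· ++ [p.1]))
          PySem.Dict.empty).items.flatMap pvGroupPairs) (fun t => t.1)
        = pvP (lst.map pvGetId) := by
      apply PySem.List.sorted_eq_of_perm_of_pairwise_lt
      · rw [hgroups]; exact (pv_main (lst.map pvGetId)).symm
      · exact pv_pairwise _ _ (PySem.List.pairwise_lt_enumerate _ _)
    rw [hA, hsorted]
    congr 1
    cases (pvP (lst.map pvGetId)).map (fun t => pvErr t.1 t.2.1 t.2.2) <;> rfl
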